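-- pv_equiv track=rewrite | github.com/vaveave/advent-of-code | aoc/2023/03/__main__.py | isolate_part
-- ===== SOURCE A (Python) =====
-- def isolate_part(row: str, pos: int):
--     start_pos = pos
--     end_pos = pos
--
--     # Move left to find the starting position of the digits
--     while start_pos >= 0 and row[start_pos].isdigit():
--         start_pos -= 1
--
--     # Move right to find the ending position of the digits
--     while end_pos < len(row) and row[end_pos].isdigit():
--         end_pos += 1
--
--     # Extract the digits from the string
--     extracted_digits = row[start_pos + 1:end_pos]
--     return int(extracted_digits)
-- ===== SOURCE B (Python) =====
-- def isolate_part(row, pos):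
--     # Left-to-right scan over maximal digit runs; return int of the run covering pos.
--     i, n = 0, len(row)
--     while i < n:
--         if row[i].isdigit():
--             j = i
--             while j < n and row[j].isdigit():
--                 j += 1
--             if i <= pos < j:
--                 return int(row[i:j])
--             i = j
--         else:
--             i += 1
--     raise ValueError("position is not inside a number")
-- ===== Notes on version B (the rewrite author's own statement) =====
-- stated objective: alternative
-- what changed: Replaces A's bidirectional expansion of digit indices around pos with a single left-to-right scan over maximal digit runs that returns int() of the run covering pos.
-- outside the precondition, e.g. on isolate_part('12', -1): A returns 12, B raises ValueError
import Mathlib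
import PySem

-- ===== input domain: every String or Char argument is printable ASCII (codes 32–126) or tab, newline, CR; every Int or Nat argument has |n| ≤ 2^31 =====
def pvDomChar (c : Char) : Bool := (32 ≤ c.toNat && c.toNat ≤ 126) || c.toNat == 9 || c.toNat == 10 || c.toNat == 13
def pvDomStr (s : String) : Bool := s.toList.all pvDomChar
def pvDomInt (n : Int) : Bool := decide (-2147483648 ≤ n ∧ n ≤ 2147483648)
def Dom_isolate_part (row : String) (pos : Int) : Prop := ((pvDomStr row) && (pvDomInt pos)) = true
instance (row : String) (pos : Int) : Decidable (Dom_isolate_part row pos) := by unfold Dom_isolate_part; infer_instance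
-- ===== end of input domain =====

-- B replaces A's bidirectional expansion from pos with a single left-to-right scan
-- over maximal digit runs, returning int() of the run covering pos (objective: alternative).

-- ===== PORT A =====
-- while start_pos >= 0 and row[start_pos].isdigit(): start_pos -= 1
-- (pyGet? = none is Python's IndexError, reached only when pos ≥ len(row); excluded by Pre_)
def pvA_left (cs : List Char) (sp : Int) : Int :=
  if _h : 0 ≤ sp then
    match PySem.List.pyGet? cs sp with
    | some c => if PySem.Chars.isdigit c then pvA_left cs (sp - 1) else sp
    | none => sp
  else sp
termination_by (sp + 1).toNat
decreasing_by omega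

-- while end_pos < len(row) and row[end_pos].isdigit(): end_pos += 1
-- (pyGet? wraps a negative end_pos from the end, exactly as Python's row[end_pos] does)
def pvA_right (cs : List Char) (ep : Int) : Int :=
  if _h : ep < (cs.length : Int) then
    match PySem.List.pyGet? cs ep with
    | some c => if PySem.Chars.isdigit c then pvA_right cs (ep + 1) else ep
    | none => ep
  else ep
termination_by ((cs.length : Int) - ep).toNat
decreasing_by omega

-- int(row[start_pos + 1:end_pos]); ofChars? = none is Python's ValueError, excluded by Pre_
def isolate_part (row : String) (pos : Int) : Int :=
  let cs := row.toList
  let start_pos := pvA_left cs pos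
  let end_pos := pvA_right cs pos
  (PySem.Int.ofChars? (PySem.List.slice cs (some (start_pos + 1)) (some end_pos))).getD 0

-- ===== PORT B =====
-- inner loop: while j < n and row[j].isdigit(): j += 1
def pvB_run (cs : List Char) (j : Nat) : Nat :=
  if h : j < cs.length then
    if PySem.Chars.isdigit cs[j] then pvB_run cs (j + 1) else j
  else j
termination_by cs.length - j

theorem pvB_run_le (cs : List Char) (j : Nat) : j ≤ pvB_run cs j := by
  fun_induction pvB_run cs j with
  | case1 j h hd ih => omega
  | case2 j h hd => omega
  | case3 j h => omega

-- outer loop over i; falling off the end is Python's raised ValueError (excluded by Pre_)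
def pvB_scan (cs : List Char) (pos : Int) (i : Nat) : Int :=
  if h : i < cs.length then
    if PySem.Chars.isdigit cs[i] then
      let j := pvB_run cs i
      if (i : Int) ≤ pos ∧ pos < (j : Int) then
        (PySem.Int.ofChars? (PySem.List.slice cs (some (i : Int)) (some (j : Int)))).getD 0
      else pvB_scan cs pos j
    else pvB_scan cs pos (i + 1)
  else 0
termination_by cs.length - i
decreasing_by
  · have h2 : i + 1 ≤ pvB_run cs (i + 1) := pvB_run_le cs (i + 1)
    have : pvB_run cs i = pvB_run cs (i + 1) := by
      conv_lhs => rw [pvB_run]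
      simp [*]
    omega
  · omega

def isolate_part_alt (row : String) (pos : Int) : Int :=
  pvB_scan row.toList pos 0

-- ===== PRECONDITION & SPEC =====
-- Pre_ excludes exactly the inputs on which A raises or its value is a wraparound artefact:
-- pos ≥ len(row) (A raises IndexError), pos not on a digit with 0 ≤ pos (A raises ValueError
-- via int('')), and pos < 0 (A usually raises ValueError, but negative-index wraparound can
-- make it return a value, e.g. ("12", -1) ↦ 12 — an artefact; B raises ValueError there).
def Pre_isolate_part (row : String) (pos : Int) : Prop :=
  0 ≤ pos ∧ pos < (row.toList.length : Int) ∧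
    PySem.Chars.isdigit (row.toList.getD pos.toNat ' ') = true
instance (row : String) (pos : Int) : Decidable (Pre_isolate_part row pos) := by
  unfold Pre_isolate_part; infer_instance

def pvWitness_isolate_part : String × Int := ("ab12c", 3)

def Spec_isolate_part (row : String) (pos : Int) (out : Int) : Prop := out = isolate_part_alt row pos
instance (row : String) (pos : Int) (out : Int) : Decidable (Spec_isolate_part row pos out) := by unfold Spec_isolate_part; infer_instance

-- ===== CLAIM (what is proved, stated in full; the proofs are below) =====
def Claim_equal_isolate_part : Prop := ∀ (row : String) (pos : Int), Dom_isolate_part row pos → Pre_isolate_part row pos → Spec_isolate_part row pos (isolate_part row pos)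

-- ===== LEMMAS AND PROOFS =====

-- digit test used by the proofs (getD with a non-digit default)
def pvDig (cs : List Char) (t : Nat) : Bool := PySem.Chars.isdigit (cs.getD t ' ')

theorem pvDig_lt {cs : List Char} {t : Nat} (h : pvDig cs t = true) : t < cs.length := by
  by_contra hn
  simp [pvDig, List.getD, List.getElem?_eq_none (by omega : cs.length ≤ t)] at h
  exact absurd h (by decide)

theorem pvDig_eq {cs : List Char} {t : Nat} (h : t < cs.length) :
    pvDig cs t = PySem.Chars.isdigit cs[t] := by
  simp [pvDig, List.getD, List.getElem?_eq_getElem h]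

-- pvB_run's result: all digits in between, and maximal to the right
theorem pvB_run_all (cs : List Char) (j : Nat) :
    ∀ t, j ≤ t → t < pvB_run cs j → pvDig cs t = true := by
  fun_induction pvB_run cs j with
  | case1 j h hd ih =>
      intro t h1 h2
      rcases Nat.eq_or_lt_of_le h1 with rfl | h1
      · rw [pvDig_eq h]; exact hd
      · exact ih t h1 h2
  | case2 j h hd => intro t h1 h2; omega
  | case3 j h => intro t h1 h2; omega

theorem pvB_run_stop (cs : List Char) (j : Nat) :
    pvDig cs (pvB_run cs j) = false := by
  fun_induction pvB_run cs j with
  | case1 j h hd ih => exact ih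
  | case2 j h hd => rw [pvDig_eq h]; simpa using hd
  | case3 j h =>
      by_cases hj : j < cs.length
      · omega
      · simp [pvDig, List.getD, List.getElem?_eq_none (by omega : cs.length ≤ j)]
        decide

-- stepping the run start right through a digit does not change its end
theorem pvB_run_succ (cs : List Char) (j : Nat) (h : j < cs.length)
    (hd : PySem.Chars.isdigit cs[j] = true) : pvB_run cs j = pvB_run cs (j + 1) := by
  conv_lhs => rw [pvB_run]
  simp [h, hd]

theorem pvB_run_of_all (cs : List Char) (i p : Nat) (hip : i ≤ p)
    (hall : ∀ t, i ≤ t → t ≤ p → pvDig cs t = true) :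
    pvB_run cs i = pvB_run cs p := by
  induction p with
  | zero =>
      have : i = 0 := by omega
      subst this; rfl
  | succ p ih =>
      rcases Nat.eq_or_lt_of_le hip with rfl | h
      · rfl
      · have h1 : pvB_run cs i = pvB_run cs p :=
          ih (by omega) (fun t ht1 ht2 => hall t ht1 (by omega))
        have hp : pvDig cs p = true := hall p (by omega) (by omega)
        rw [h1, pvB_run_succ cs p (pvDig_lt hp) (by rw [← pvDig_eq (pvDig_lt hp)]; exact hp)]

-- A's right expansion from a Nat index is exactly B's run scanner
theorem pvA_right_eq (cs : List Char) (j : Nat) :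
    pvA_right cs (j : Int) = (pvB_run cs j : Int) := by
  fun_induction pvB_run cs j with
  | case1 j h hd ih =>
      rw [← ih]
      conv_lhs => rw [pvA_right]
      have hlt : (j : Int) < (cs.length : Int) := by exact_mod_cast h
      simp [hlt, List.getElem?_eq_getElem h, hd]
  | case2 j h hd =>
      conv_lhs => rw [pvA_right]
      have hlt : (j : Int) < (cs.length : Int) := by exact_mod_cast h
      simp [hlt, List.getElem?_eq_getElem h, hd]
  | case3 j h =>
      conv_lhs => rw [pvA_right]
      have hlt : ¬ (j : Int) < (cs.length : Int) := by
        intro hc; exact h (by exact_mod_cast hc)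
      simp [hlt]

-- A's left expansion: one step through a digit, and the two ways it stops
theorem pvA_left_step (cs : List Char) (t : Nat) (h : t < cs.length)
    (hd : PySem.Chars.isdigit cs[t] = true) :
    pvA_left cs (t : Int) = pvA_left cs ((t : Int) - 1) := by
  conv_lhs => rw [pvA_left]
  simp [List.getElem?_eq_getElem h, hd]

theorem pvA_left_stop (cs : List Char) (t : Nat) (h : t < cs.length)
    (hnd : PySem.Chars.isdigit cs[t] = false) :
    pvA_left cs (t : Int) = (t : Int) := by
  conv_lhs => rw [pvA_left]
  simp [List.getElem?_eq_getElem h, hnd]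

theorem pvA_left_neg (cs : List Char) : pvA_left cs (-1) = -1 := by
  rw [pvA_left]
  norm_num

-- A's left expansion from p stops just before i, the start of p's maximal run
theorem pvA_left_eq (cs : List Char) (i p : Nat) (hip : i ≤ p)
    (hall : ∀ t, i ≤ t → t ≤ p → pvDig cs t = true)
    (hstart : i = 0 ∨ pvDig cs (i - 1) = false) :
    pvA_left cs (p : Int) = (i : Int) - 1 := by
  induction p with
  | zero =>
      have hi0 : i = 0 := by omega
      subst hi0
      have h0 : pvDig cs 0 = true := hall 0 (by omega) (by omega)
      have hlt := pvDig_lt h0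
      rw [pvDig_eq hlt] at h0
      rw [pvA_left_step cs 0 hlt h0]
      norm_num [pvA_left_neg]
  | succ p ih =>
      have hp : pvDig cs (p + 1) = true := hall (p + 1) (by omega) (by omega)
      have hlt := pvDig_lt hp
      rw [pvDig_eq hlt] at hp
      rw [pvA_left_step cs (p + 1) hlt hp]
      have e1 : (((p + 1 : Nat) : Int)) - 1 = ((p : Nat) : Int) := by push_cast; ring
      rw [e1]
      rcases Nat.eq_or_lt_of_le hip with rfl | h
      · rcases hstart with h0 | hnd
        · omega
        · have hplt : p < cs.length := by omega
          have : (p + 1) - 1 = p := by omega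
          rw [this] at hnd
          rw [pvDig_eq hplt] at hnd
          rw [pvA_left_stop cs p hplt hnd]
          push_cast; ring
      · exact ih (by omega) (fun t ht1 ht2 => hall t ht1 (by omega))

-- main loop invariant for B's outer scan
theorem pvB_scan_eq (cs : List Char) (pos : Int) (p : Nat) (hp : pos = (p : Int))
    (hd : pvDig cs p = true) :
    ∀ k i, p - i = k → i ≤ p → (pvDig cs i = true → i = 0 ∨ pvDig cs (i - 1) = false) →
      pvB_scan cs pos i =
        (PySem.Int.ofChars? (PySem.List.slice cs (some (pvA_left cs pos + 1))
          (some (pvA_right cs pos)))).getD 0 := by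
  intro k
  induction k using Nat.strong_induction_on with
  | _ k ih =>
    intro i hk hip hstart
    have hpn : p < cs.length := pvDig_lt hd
    have hin : i < cs.length := by omega
    unfold pvB_scan
    simp only [dif_pos hin]
    by_cases hdi : PySem.Chars.isdigit cs[i] = true
    · simp only [if_pos hdi]
      have hdi' : pvDig cs i = true := by rw [pvDig_eq hin]; exact hdi
      by_cases hcov : (i : Int) ≤ pos ∧ pos < (pvB_run cs i : Int)
      · -- the run [i, pvB_run cs i) contains p: both sides name the same slice
        simp only [if_pos hcov]
        have hallp : ∀ t, i ≤ t → t ≤ p → pvDig cs t = true := by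
          intro t ht1 ht2
          exact pvB_run_all cs i t ht1 (by
            have : pos < (pvB_run cs i : Int) := hcov.2
            omega)
        rw [hp, pvA_left_eq cs i p hip hallp (hstart hdi'),
            pvA_right_eq cs p, ← pvB_run_of_all cs i p hip hallp]
        norm_num
      · -- run ends at or before p: jump to its end
        simp only [if_neg hcov]
        have hj : pvB_run cs i ≤ p := by
          rcases (not_and_or.mp hcov) with h1 | h1
          · omega
          · omega
        have hjgt : i < pvB_run cs i := by
          have := pvB_run_le cs (i + 1)
          rw [pvB_run_succ cs i hin hdi]; omega
        exact ih (p - pvB_run cs i) (by omega) (pvB_run cs i) rfl hj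
          (fun hdig => absurd hdig (by simp [pvB_run_stop cs i]))
    · simp only [if_neg hdi]
      have hilt : i < p := by
        rcases Nat.eq_or_lt_of_le hip with rfl | h
        · rw [pvDig_eq hin] at hd; exact absurd hd hdi
        · exact h
      exact ih (p - (i + 1)) (by omega) (i + 1) rfl (by omega)
        (fun _ => Or.inr (by simpa [pvDig_eq hin] using hdi))

-- ===== VERDICT (by name: the statement is the Claim_ definition above) =====
theorem isolate_part_spec : Claim_equal_isolate_part := by
  intro row pos _ hpre
  obtain ⟨h0, hlen, hdig⟩ := hpre
  unfold Spec_isolate_part isolate_part isolate_part_alt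
  have hp : pos = ((pos.toNat : Nat) : Int) := by omega
  have hd : pvDig row.toList pos.toNat = true := hdig
  exact (pvB_scan_eq row.toList pos pos.toNat hp hd (pos.toNat - 0) 0 rfl (by omega)
    (fun _ => Or.inl rfl)).symm
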